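-- pv_equiv track=rewrite | github.com/TanZunsheng/PENCI | scripts/convert_to_hdf5_by_fingerprint.py | group_by_fingerprint
-- ===== SOURCE A (Python) =====
-- from collections import defaultdict
-- from typing import Any, Dict, List, Optional, Tuple
--
-- def group_by_fingerprint(
--     records: List[Dict],
-- ) -> Tuple[Dict[str, List[Dict]], int]:
--     """按 fingerprint 分组，过滤无指纹记录。"""
--     groups: Dict[str, List[Dict]] = defaultdict(list)
--     skipped = 0
--     for meta in records:
--         fp = meta.get("fingerprint")
--         if not fp or fp in ("", "unknown"):
--             skipped += 1
--             continue
--         groups[fp].append(meta)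
--
--     return dict(groups), skipped
-- ===== SOURCE B (Python) =====
-- def group_by_fingerprint(records):
--     kept = [m for m in records
--             if m.get("fingerprint") and m.get("fingerprint") != "unknown"]
--     skipped = len(records) - len(kept)
--     keys = list(dict.fromkeys(m["fingerprint"] for m in kept))
--     groups = {k: [m for m in kept if m["fingerprint"] == k] for k in keys}
--     return groups, skipped
-- ===== Notes on version B (the rewrite author's own statement) =====
-- stated objective: idiomatic
-- what changed: Replaces the incremental defaultdict-append loop with a declarative pipeline: filter the valid records once, dedupe their fingerprints in first-occurrence order with dict.fromkeys, and build each group by a comprehension over the kept records.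
import Mathlib
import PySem

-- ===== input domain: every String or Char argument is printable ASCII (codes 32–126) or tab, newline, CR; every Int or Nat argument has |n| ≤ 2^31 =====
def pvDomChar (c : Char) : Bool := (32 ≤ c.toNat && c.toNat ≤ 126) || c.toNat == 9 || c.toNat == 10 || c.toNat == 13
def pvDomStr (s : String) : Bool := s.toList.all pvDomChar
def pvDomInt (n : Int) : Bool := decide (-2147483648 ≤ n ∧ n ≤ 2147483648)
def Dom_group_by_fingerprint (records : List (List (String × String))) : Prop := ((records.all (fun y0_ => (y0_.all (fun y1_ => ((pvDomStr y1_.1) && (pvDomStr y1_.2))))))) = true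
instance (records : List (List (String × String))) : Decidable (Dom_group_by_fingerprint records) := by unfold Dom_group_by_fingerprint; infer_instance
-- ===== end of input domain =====

-- B replaces A's incremental defaultdict-append loop by a filter / ordered-dedup / per-key
-- comprehension pipeline; same return value, no speed claim.

-- ===== PORT A =====
-- one step of A's loop body (fp = meta.get("fingerprint"); skip or append)
def pvAStep (st : PySem.Dict String (List (List (String × String))) × Int)
    (rec : List (String × String)) :
    PySem.Dict String (List (List (String × String))) × Int :=
  match (PySem.Dict.mk rec).get? "fingerprint" with
  | none => (st.1, st.2 + 1)
  | some fp =>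
    if fp = "" ∨ (fp = "" ∨ fp = "unknown") then (st.1, st.2 + 1)
    else (st.1.modify fp [] (· ++ [rec]), st.2)

def group_by_fingerprint (records : List (List (String × String))) : (List (String × List (List (String × String)))) × Int :=
  let res := records.foldl pvAStep (PySem.Dict.empty, 0)
  (res.1.items, res.2)

-- ===== PORT B =====
-- keep predicate of B's first comprehension: m.get("fingerprint") truthy and != "unknown"
def pvBKeep (m : List (String × String)) : Bool :=
  match (PySem.Dict.mk m).get? "fingerprint" with
  | none => false
  | some fp => fp ≠ "" && fp ≠ "unknown"

-- m["fingerprint"]; only used on kept records, where the key is present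
def pvBFp (m : List (String × String)) : String :=
  ((PySem.Dict.mk m).get? "fingerprint").getD ""

def group_by_fingerprint_alt (records : List (List (String × String))) : (List (String × List (List (String × String)))) × Int :=
  let kept := records.filter pvBKeep
  let skipped : Int := (records.length : Int) - (kept.length : Int)
  let keys := PySem.List.dedup (kept.map pvBFp)
  let groups := keys.map (fun k => (k, kept.filter (fun m => pvBFp m == k)))
  (groups, skipped)

-- ===== PRECONDITION & SPEC =====
def Spec_group_by_fingerprint (records : List (List (String × String))) (out : (List (String × List (List (String × String)))) × Int) : Prop := out = group_by_fingerprint_alt records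
instance (records : List (List (String × String))) (out : (List (String × List (List (String × String)))) × Int) : Decidable (Spec_group_by_fingerprint records out) := by unfold Spec_group_by_fingerprint; infer_instance

-- ===== CLAIM (what is proved, stated in full; the proofs are below) =====
def Claim_equal_group_by_fingerprint : Prop := ∀ (records : List (List (String × String))), Dom_group_by_fingerprint records → Spec_group_by_fingerprint records (group_by_fingerprint records)

-- ===== LEMMAS AND PROOFS =====

-- A's loop splits into: the grouping fold over the kept records, and skipped = number dropped.
theorem pvA_foldl (records : List (List (String × String)))
    (d : PySem.Dict String (List (List (String × String)))) (s : Int) :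
    records.foldl pvAStep (d, s)
      = ((records.filter pvBKeep).foldl (fun d m => d.modify (pvBFp m) [] (· ++ [m])) d,
         s + ((records.filter (fun m => !pvBKeep m)).length : Int)) := by
  induction records generalizing d s with
  | nil => simp
  | cons m rs ih =>
    simp only [List.foldl_cons, List.filter_cons]
    rcases hget : (PySem.Dict.mk m).get? "fingerprint" with _ | fp
    · simp [pvAStep, pvBKeep, hget, ih]
      omega
    · by_cases hskip : fp = "" ∨ (fp = "" ∨ fp = "unknown")
      · have hk : pvBKeep m = false := by
          simp [pvBKeep, hget]
          rcases hskip with h | h | h <;> simp [h]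
        simp [pvAStep, hget, hskip, hk, ih]
        omega
      · have hk : pvBKeep m = true := by
          rw [not_or, not_or] at hskip
          simp [pvBKeep, hget, hskip.1, hskip.2.2]
        have hfp : pvBFp m = fp := by simp [pvBFp, hget]
        simp [pvAStep, hget, hskip, hk, hfp, ih]

-- the grouping fold over the kept records, as the map B builds
theorem pvA_dict_items (kept : List (List (String × String))) :
    (kept.foldl (fun d m => d.modify (pvBFp m) [] (· ++ [m])) PySem.Dict.empty).items
      = (PySem.List.dedup (kept.map pvBFp)).map
          (fun k => (k, kept.filter (fun m => pvBFp m == k))) := by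
  set D := kept.foldl (fun d m => d.modify (pvBFp m) [] (· ++ [m])) PySem.Dict.empty with hD
  have hfold : D = (kept.map (fun m => (pvBFp m, m))).foldl
      (fun d p => d.modify p.1 [] (· ++ [p.2])) PySem.Dict.empty := by
    rw [hD, List.foldl_map]
  have hkeys : D.keys = PySem.Set.ofList (kept.map pvBFp) := by
    rw [hD, PySem.Dict.keys_foldl_modify_key]
    simp [PySem.Dict.keys_empty, PySem.Set.update_nil_left]
  have hnd : D.keys.Nodup := by
    rw [hkeys]; exact PySem.Set.nodup_ofList _
  have hget : ∀ k, D.getD k [] = kept.filter (fun m => pvBFp m == k) := by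
    intro k
    rw [hfold, PySem.Dict.getD_foldl_modify_append]
    rw [List.filter_map, List.map_map]
    simp [PySem.Dict.getD_empty, Function.comp_def]
  calc D.items = D.keys.map (fun k => (k, D.getD k [])) :=
        PySem.Dict.items_eq_map_keys D hnd []
    _ = (PySem.List.dedup (kept.map pvBFp)).map
          (fun k => (k, kept.filter (fun m => pvBFp m == k))) := by
        rw [hkeys, PySem.List.dedup_eq_ofList]
        exact List.map_congr_left (fun k _ => by rw [hget k])

theorem pv_len_split (records : List (List (String × String))) :
    ((records.filter (fun m => !pvBKeep m)).length : Int)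
      = (records.length : Int) - ((records.filter pvBKeep).length : Int) := by
  have := (List.length_eq_length_filter_add pvBKeep (l := records)).symm
  omega

-- ===== VERDICT (by name: the statement is the Claim_ definition above) =====
theorem group_by_fingerprint_spec : Claim_equal_group_by_fingerprint := by
  intro records _
  unfold Spec_group_by_fingerprint group_by_fingerprint group_by_fingerprint_alt
  rw [pvA_foldl]
  simp only [pvA_dict_items, pv_len_split]
  rw [zero_add]
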